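-- pv_equiv track=rewrite | github.com/mastersamasama/kiho | plugins/kiho/skills/_meta/skill-spec/scripts/extract_signals.py | consumer_context_filter
-- ===== SOURCE A (Python) =====
-- CONSUMER_CONTEXT_MARKERS = [
--     "use when", "used when", "after", "called by", "invoked by", "consumed by",
--     "downstream of", "triggered by", "in response to", "when the",
-- ]
--
-- def consumer_context_filter(intent: str, matched_words: list[str]) -> tuple[list[str], list[str]]:
--     """Split matched_words into (actor_matches, consumer_matches).
--
--     A match is a 'consumer mention' if every occurrence of the word in the intent
--     text appears within ~5 tokens after a consumer-context marker phrase
--     (e.g., 'use when the recruit skill ...'). Such matches are suppressed from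
--     topic-tag scoring to avoid the recruit→hiring false-positive class.
--     """
--     if not matched_words:
--         return [], []
--     text = intent.lower()
--     actor: list[str] = []
--     consumer: list[str] = []
--     for w in matched_words:
--         w_low = w.lower()
--         positions = [i for i in range(len(text)) if text.startswith(w_low, i)]
--         if not positions:
--             actor.append(w)
--             continue
--         all_consumer = True
--         for pos in positions:
--             window_start = max(0, pos - 60)
--             preceding = text[window_start:pos]
--             if not any(marker in preceding for marker in CONSUMER_CONTEXT_MARKERS):
--                 all_consumer = False
--                 break
--         if all_consumer:
--             consumer.append(w)
--         else:
--             actor.append(w)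
--     return actor, consumer
-- ===== SOURCE B (Python) =====
-- CONSUMER_CONTEXT_MARKERS = [
--     "use when", "used when", "after", "called by", "invoked by", "consumed by",
--     "downstream of", "triggered by", "in response to", "when the",
-- ]
--
-- def _occurrences(text, pat):
--     return [i for i in range(len(text)) if text.startswith(pat, i)]
--
-- def consumer_context_filter(intent, matched_words):
--     text = intent.lower()
--     # Precompute every position that sits within 60 chars after some marker
--     # occurrence; the original re-scans a 60-char window per word occurrence.
--     covered = set()
--     for marker in CONSUMER_CONTEXT_MARKERS:
--         L = len(marker)
--         for m in _occurrences(text, marker):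
--             covered.update(range(m + L, m + 61))
--     actor, consumer = [], []
--     for w in matched_words:
--         positions = _occurrences(text, w.lower())
--         if positions and all(p in covered for p in positions):
--             consumer.append(w)
--         else:
--             actor.append(w)
--     return actor, consumer
-- ===== Notes on version B (the rewrite author's own statement) =====
-- stated objective: alternative
-- what changed: B precomputes in one pass the set of text positions lying within 60 characters after some consumer-marker occurrence, then classifies each word's occurrences by set membership, instead of A's re-scanning a 60-character preceding window against all 10 markers for every occurrence of every word.
import Mathlib
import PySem

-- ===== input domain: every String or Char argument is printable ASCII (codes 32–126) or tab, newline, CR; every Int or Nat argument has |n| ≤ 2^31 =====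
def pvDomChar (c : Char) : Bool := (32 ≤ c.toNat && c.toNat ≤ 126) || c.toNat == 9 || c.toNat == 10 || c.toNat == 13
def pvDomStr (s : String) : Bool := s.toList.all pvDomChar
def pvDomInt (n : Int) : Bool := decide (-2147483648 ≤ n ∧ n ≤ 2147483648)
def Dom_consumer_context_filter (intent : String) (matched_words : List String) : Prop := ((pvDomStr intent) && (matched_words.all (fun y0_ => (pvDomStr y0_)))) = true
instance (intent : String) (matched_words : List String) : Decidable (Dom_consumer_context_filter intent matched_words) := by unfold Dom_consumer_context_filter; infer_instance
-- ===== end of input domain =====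

-- B precomputes, in one scan, the set of positions lying ≤60 chars after some
-- consumer-marker occurrence, then classifies each word by set membership,
-- instead of A's per-occurrence rescan of a 60-char window for all 10 markers.

def pvMarkers : List (List Char) :=
  ["use when".toList, "used when".toList, "after".toList, "called by".toList,
   "invoked by".toList, "consumed by".toList, "downstream of".toList,
   "triggered by".toList, "in response to".toList, "when the".toList]

-- ===== PORT A =====
def pvStepA (text : List Char) (acc : List String × List String) (w : String) :
    List String × List String :=
  let wlow := PySem.Chars.lower w.toList
  let positions := (List.range text.length).filter
    (fun i => PySem.Chars.startswith (text.drop i) wlow)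
  if positions.isEmpty then (acc.1 ++ [w], acc.2)
  else if positions.all (fun pos => pvMarkers.any (fun mk =>
        PySem.Chars.isIn mk
          (PySem.List.slice text (some (max 0 ((pos : Int) - 60))) (some (pos : Int)))))
    then (acc.1, acc.2 ++ [w])
    else (acc.1 ++ [w], acc.2)

def consumer_context_filter (intent : String) (matched_words : List String) :
    List String × List String :=
  if matched_words.isEmpty then ([], [])
  else
    let text := PySem.Chars.lower intent.toList
    matched_words.foldl (pvStepA text) ([], [])

-- ===== PORT B =====
def pvOcc (text pat : List Char) : List Nat :=
  (List.range text.length).filter (fun i => PySem.Chars.startswith (text.drop i) pat)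

def pvCovered (text : List Char) : PySem.Set Nat :=
  PySem.Set.ofList (pvMarkers.flatMap (fun mk =>
    (pvOcc text mk).flatMap (fun m => List.range' (m + mk.length) (61 - mk.length))))

def pvStepB (covered : PySem.Set Nat) (text : List Char)
    (acc : List String × List String) (w : String) : List String × List String :=
  let positions := pvOcc text (PySem.Chars.lower w.toList)
  if !positions.isEmpty && positions.all (fun p => covered.contains p)
    then (acc.1, acc.2 ++ [w])
    else (acc.1 ++ [w], acc.2)

def consumer_context_filter_alt (intent : String) (matched_words : List String) :
    List String × List String :=
  let text := PySem.Chars.lower intent.toList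
  matched_words.foldl (pvStepB (pvCovered text) text) ([], [])

-- ===== PRECONDITION & SPEC =====
def Spec_consumer_context_filter (intent : String) (matched_words : List String) (out : List String × List String) : Prop := out = consumer_context_filter_alt intent matched_words
instance (intent : String) (matched_words : List String) (out : List String × List String) : Decidable (Spec_consumer_context_filter intent matched_words out) := by unfold Spec_consumer_context_filter; infer_instance

-- ===== CLAIM (what is proved, stated in full; the proofs are below) =====
def Claim_equal_consumer_context_filter : Prop := ∀ (intent : String) (matched_words : List String), Dom_consumer_context_filter intent matched_words → Spec_consumer_context_filter intent matched_words (consumer_context_filter intent matched_words)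

-- ===== LEMMAS AND PROOFS =====
lemma pvMarkers_len : ∀ mk ∈ pvMarkers, 1 ≤ mk.length ∧ mk.length ≤ 61 := by decide

-- A's window test for a marker, characterised by the occurrence position m of the marker.
lemma pv_slice_iff (text mk : List Char) (pos : Nat) (hL : 1 ≤ mk.length ∧ mk.length ≤ 61) :
    PySem.Chars.isIn mk
      (PySem.List.slice text (some (max 0 ((pos : Int) - 60))) (some (pos : Int))) = true
    ↔ ∃ m, pos - 60 ≤ m ∧ m + mk.length ≤ pos ∧ mk <+: text.drop m := by
  have hmax : max 0 ((pos : Int) - 60) = ((pos - 60 : Nat) : Int) := by omega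
  rw [hmax, PySem.List.slice_natCast, ← PySem.Chars.exists_prefix_drop_iff_isIn]
  constructor
  · rintro ⟨j, hpre⟩
    rw [List.drop_take, List.drop_drop, List.prefix_take_iff] at hpre
    exact ⟨pos - 60 + j, by omega, by omega, hpre.1⟩
  · rintro ⟨m, h1, h2, hpre⟩
    refine ⟨m - (pos - 60), ?_⟩
    rw [List.drop_take, List.drop_drop, List.prefix_take_iff]
    have hm : pos - 60 + (m - (pos - 60)) = m := by omega
    rw [hm]
    exact ⟨hpre, by omega⟩

-- B's covered set contains pos exactly when A's window test succeeds at pos.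
lemma pv_covered_iff (text : List Char) (pos : Nat) :
    (pvCovered text).contains pos
    = pvMarkers.any (fun mk => PySem.Chars.isIn mk
        (PySem.List.slice text (some (max 0 ((pos : Int) - 60))) (some (pos : Int)))) := by
  rw [Bool.eq_iff_iff]
  rw [show ((pvCovered text).contains pos = true) ↔ pos ∈ pvCovered text from
    PySem.Set.contains_iff _ _]
  unfold pvCovered
  rw [PySem.Set.mem_ofList]
  simp only [List.mem_flatMap, pvOcc, List.mem_filter, List.mem_range,
    PySem.Chars.startswith_iff, List.mem_range'_1, List.any_eq_true]
  constructor
  · rintro ⟨mk, hmk, m, ⟨hmlt, hpre⟩, hle, hlt⟩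
    have hL := pvMarkers_len mk hmk
    exact ⟨mk, hmk, (pv_slice_iff text mk pos hL).mpr ⟨m, by omega, by omega, hpre⟩⟩
  · rintro ⟨mk, hmk, hisin⟩
    have hL := pvMarkers_len mk hmk
    obtain ⟨m, h1, h2, hpre⟩ := (pv_slice_iff text mk pos hL).mp hisin
    have hlen : mk.length ≤ (text.drop m).length := hpre.length_le
    rw [List.length_drop] at hlen
    exact ⟨mk, hmk, m, ⟨by omega, hpre⟩, by omega, by omega⟩

lemma pv_step_eq (text : List Char) (acc : List String × List String) (w : String) :
    pvStepA text acc w = pvStepB (pvCovered text) text acc w := by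
  simp only [pvStepA, pvStepB, pvOcc]
  have hc : (fun (pos : Nat) => pvMarkers.any (fun mk => PySem.Chars.isIn mk
        (PySem.List.slice text (some (max 0 ((pos : Int) - 60))) (some (pos : Int)))))
      = (fun p => (pvCovered text).contains p) :=
    funext fun p => (pv_covered_iff text p).symm
  rw [hc]
  by_cases he : ((List.range text.length).filter
      (fun i => PySem.Chars.startswith (text.drop i) (PySem.Chars.lower w.toList))).isEmpty = true
  · simp [he]
  · rw [Bool.not_eq_true] at he
    simp [he]

lemma pv_fold_eq (text : List Char) (mw : List String) (acc : List String × List String) :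
    mw.foldl (pvStepA text) acc = mw.foldl (pvStepB (pvCovered text) text) acc := by
  induction mw generalizing acc with
  | nil => rfl
  | cons w tl ih => simp only [List.foldl_cons, pv_step_eq, ih]

-- ===== VERDICT (by name: the statement is the Claim_ definition above) =====
theorem consumer_context_filter_spec : Claim_equal_consumer_context_filter := by
  intro intent matched_words _
  unfold Spec_consumer_context_filter consumer_context_filter consumer_context_filter_alt
  cases matched_words with
  | nil => rfl
  | cons w tl =>
    simp only [List.isEmpty_cons, if_false, Bool.false_eq_true]
    exact pv_fold_eq _ _ _
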